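-- pv_equiv track=rewrite | github.com/monsterbat/WeHelp_BootCamp | Stage1_Week3/wehelp_w3_Q1.py | firstPic_filter
-- ===== SOURCE A (Python) =====
-- def firstPic_filter(data):
--     firstPic_url=""
--     filter_word_1=".jpg"
--     filter_word_2=".JPG"
--     for firstPic_url_bit in data:
--         firstPic_url=firstPic_url+firstPic_url_bit
--         if filter_word_1 in firstPic_url:
--             break
--         if filter_word_2 in firstPic_url:
--             break
--     return firstPic_url
-- ===== SOURCE B (Python) =====
-- def firstPic_filter(data):
--     for i in range(len(data)):
--         if i >= 3 and data[i - 3:i + 1] in (".jpg", ".JPG"):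
--             return data[:i + 1]
--     return data
-- ===== Notes on version B (the rewrite author's own statement) =====
-- stated objective: faster
-- what changed: Instead of re-scanning the whole growing accumulated prefix for the two filter words after every appended character, B slides a fixed 4-character window over the input once and returns the prefix ending at the first window that equals a filter word.
import Mathlib
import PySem

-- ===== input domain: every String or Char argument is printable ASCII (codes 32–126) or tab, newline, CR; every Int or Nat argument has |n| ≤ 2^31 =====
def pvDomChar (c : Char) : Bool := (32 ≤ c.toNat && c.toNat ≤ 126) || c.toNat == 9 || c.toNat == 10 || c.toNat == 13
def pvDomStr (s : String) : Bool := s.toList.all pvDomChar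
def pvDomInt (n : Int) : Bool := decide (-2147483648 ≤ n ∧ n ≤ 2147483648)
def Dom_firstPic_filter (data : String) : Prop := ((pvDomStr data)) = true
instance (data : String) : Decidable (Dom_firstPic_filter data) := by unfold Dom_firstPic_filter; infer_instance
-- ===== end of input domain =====

-- B replaces A's quadratic rescan of the whole growing prefix after every appended character
-- with a single pass that checks only the 4-character window ending at each position (objective: faster).

-- ===== PORT A =====
-- the loop: accumulate one character, test both filter words on the whole accumulator, break on a hit
def pvGoA (w1 w2 acc : List Char) : List Char → List Char
  | [] => acc
  | c :: rest =>
    let acc' := acc ++ [c]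
    if PySem.Chars.isIn w1 acc' then acc'
    else if PySem.Chars.isIn w2 acc' then acc'
    else pvGoA w1 w2 acc' rest

def firstPic_filter (data : String) : String :=
  let filter_word_1 := ".jpg"
  let filter_word_2 := ".JPG"
  String.ofList (pvGoA filter_word_1.toList filter_word_2.toList [] data.toList)

-- ===== PORT B =====
-- the loop: for i in range(len(data)): if i >= 3 and data[i-3:i+1] in (".jpg", ".JPG"): return data[:i+1]
def pvGoB (cs : List Char) (i : Nat) : List Char :=
  if _h : i < cs.length then
    if 3 ≤ i ∧ (PySem.List.slice cs (some ((i : Int) - 3)) (some ((i : Int) + 1)) = ".jpg".toList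
              ∨ PySem.List.slice cs (some ((i : Int) - 3)) (some ((i : Int) + 1)) = ".JPG".toList) then
      PySem.List.slice cs none (some ((i : Int) + 1))
    else pvGoB cs (i + 1)
  else cs
termination_by cs.length - i

def firstPic_filter_alt (data : String) : String :=
  String.ofList (pvGoB data.toList 0)

-- ===== PRECONDITION & SPEC =====
def Spec_firstPic_filter (data : String) (out : String) : Prop := out = firstPic_filter_alt data
instance (data : String) (out : String) : Decidable (Spec_firstPic_filter data out) := by unfold Spec_firstPic_filter; infer_instance

-- ===== CLAIM (what is proved, stated in full; the proofs are below) =====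
def Claim_equal_firstPic_filter : Prop := ∀ (data : String), Dom_firstPic_filter data → Spec_firstPic_filter data (firstPic_filter data)

-- ===== LEMMAS AND PROOFS =====

-- if a word is not an infix of acc, then being an infix of acc ++ [c] is being a suffix of it
lemma pv_infix_concat_iff (w acc : List Char) (c : Char) (h : ¬ w <:+: acc) :
    w <:+: acc ++ [c] ↔ w <:+ acc ++ [c] := by
  constructor
  · rintro ⟨pre, suf, heq⟩
    rcases suf.eq_nil_or_concat with rfl | ⟨s', a, rfl⟩
    · exact ⟨pre, by simpa using heq⟩
    · exfalso
      have h' : (pre ++ w ++ s') ++ [a] = acc ++ [c] := by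
        simpa [List.append_assoc] using heq
      have h2 := List.append_inj' h' rfl
      exact h ⟨pre, s', h2.1⟩
  · exact List.IsSuffix.isInfix

lemma pv_suffix_iff_drop (w l : List Char) : w <:+ l ↔ l.drop (l.length - w.length) = w := by
  constructor
  · rintro ⟨t, rfl⟩
    simp
  · intro h; rw [← h]; exact List.drop_suffix _ _

-- B's slice data[i-3:i+1] (i ≥ 3) is a 4-character window
lemma pv_slice_window (cs : List Char) (k : Nat) (h : 3 ≤ k) :
    PySem.List.slice cs (some ((k : Int) - 3)) (some ((k : Int) + 1)) = (cs.drop (k - 3)).take 4 := by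
  have h1 : ((k : Int) - 3) = ((k - 3 : Nat) : Int) := by omega
  have h2 : ((k : Int) + 1) = ((k + 1 : Nat) : Int) := by omega
  rw [h1, h2, PySem.List.slice_natCast]
  congr 1
  omega

-- a fresh occurrence of a 4-character word in cs.take (k+1) is exactly B's window hit at index k
lemma pv_window_iff (w cs : List Char) (k : Nat) (hk : k < cs.length) (hw : w.length = 4)
    (hn : ¬ w <:+: cs.take k) :
    (w <:+: cs.take (k + 1)) ↔
      (3 ≤ k ∧ PySem.List.slice cs (some ((k : Int) - 3)) (some ((k : Int) + 1)) = w) := by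
  have htk : cs.take k ++ [cs[k]] = cs.take (k + 1) := List.take_append_getElem hk
  rw [← htk, pv_infix_concat_iff w _ _ hn, pv_suffix_iff_drop, htk]
  have hlen : (cs.take (k + 1)).length = k + 1 := by
    simp; omega
  rw [hlen, hw]
  by_cases h3 : 3 ≤ k
  · rw [pv_slice_window cs k h3]
    have : (cs.take (k + 1)).drop (k + 1 - 4) = (cs.drop (k - 3)).take 4 := by
      have e : k + 1 - 4 = k - 3 := by omega
      rw [e, List.drop_take]
      congr 1
      omega
    rw [this]
    simp [h3]
  · constructor
    · intro he
      exfalso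
      have := congrArg List.length he
      simp at this
      omega
    · rintro ⟨h, _⟩
      exact absurd h h3

-- the central invariant: if neither word occurs in the first k characters,
-- A's loop from acc = cs.take k agrees with B's loop from index k
lemma pv_loop_eq (cs : List Char) (k : Nat)
    (h1 : ¬ ".jpg".toList <:+: cs.take k) (h2 : ¬ ".JPG".toList <:+: cs.take k) :
    pvGoA ".jpg".toList ".JPG".toList (cs.take k) (cs.drop k) = pvGoB cs k := by
  by_cases hk : k < cs.length
  · have hdrop : cs.drop k = cs[k] :: cs.drop (k + 1) := List.drop_eq_getElem_cons hk
    have htk : cs.take k ++ [cs[k]] = cs.take (k + 1) := List.take_append_getElem hk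
    have e1 := pv_window_iff ".jpg".toList cs k hk (by decide) h1
    have e2 := pv_window_iff ".JPG".toList cs k hk (by decide) h2
    have hslice : PySem.List.slice cs none (some ((k : Int) + 1)) = cs.take (k + 1) := by
      have hc : ((k : Int) + 1) = ((k + 1 : Nat) : Int) := by omega
      rw [hc, PySem.List.slice_to_natCast]
    rw [hdrop]
    show (let acc' := cs.take k ++ [cs[k]];
      if PySem.Chars.isIn ".jpg".toList acc' then acc'
      else if PySem.Chars.isIn ".JPG".toList acc' then acc'
      else pvGoA ".jpg".toList ".JPG".toList acc' (cs.drop (k + 1))) = pvGoB cs k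
    simp only [htk]
    rw [pvGoB]
    rw [dif_pos hk]
    by_cases c1 : ".jpg".toList <:+: cs.take (k + 1)
    · rw [if_pos ((PySem.Chars.isIn_iff_infix _ _).mpr c1)]
      have hc := e1.mp c1
      rw [if_pos ⟨hc.1, Or.inl hc.2⟩, hslice]
    · rw [if_neg (by rw [PySem.Chars.isIn_iff_infix]; exact c1)]
      by_cases c2 : ".JPG".toList <:+: cs.take (k + 1)
      · rw [if_pos ((PySem.Chars.isIn_iff_infix _ _).mpr c2)]
        have hc := e2.mp c2
        rw [if_pos ⟨hc.1, Or.inr hc.2⟩, hslice]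
      · rw [if_neg (by rw [PySem.Chars.isIn_iff_infix]; exact c2)]
        rw [if_neg (by
          rintro ⟨h3, hor | hor⟩
          · exact c1 (e1.mpr ⟨h3, hor⟩)
          · exact c2 (e2.mpr ⟨h3, hor⟩))]
        exact pv_loop_eq cs (k + 1) c1 c2
  · have hd : cs.drop k = [] := by
      rw [List.drop_eq_nil_iff]; omega
    have ht : cs.take k = cs := List.take_of_length_le (by omega)
    rw [hd, ht, pvGoA, pvGoB, dif_neg hk]
termination_by cs.length - k

-- ===== VERDICT (by name: the statement is the Claim_ definition above) =====
theorem firstPic_filter_spec : Claim_equal_firstPic_filter := by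
  unfold Claim_equal_firstPic_filter Spec_firstPic_filter
  intro data _
  unfold firstPic_filter firstPic_filter_alt
  have h := pv_loop_eq data.toList 0 (by simp) (by simp)
  simpa using congrArg String.ofList h
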